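-- pv_equiv track=rewrite | github.com/AmirFone/Cornell-Algorithms-for-Applications | Homework_one /problems/problem_4/p4_b.py | most_frequent_difference_b
-- ===== SOURCE A (Python) =====
-- def most_frequent_difference_b(values, d_mode) -> int:
--     freq = {}
--     for num in values:
--         if num in freq:
--             freq[num] += 1
--         else:
--             freq[num] = 1
--
--     count = 0
--     for num in freq:
--         if d_mode == 0:
--             count += freq[num] * (freq[num] - 1)
--         else:
--             if num - d_mode in freq:
--                 count += freq[num] * freq[num - d_mode]
--
--     return count
-- ===== SOURCE B (Python) =====
-- def most_frequent_difference_b(values, d_mode) -> int: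
--     # sort, collapse into runs of equal values, then (for d_mode != 0)
--     # merge-walk two pointers over the run list pairing v with v + |d_mode|
--     s = sorted(values)
--     n = len(s)
--     runs = []
--     i = 0
--     while i < n:
--         j = i
--         while j < n and s[j] == s[i]:
--             j += 1
--         runs.append((s[i], j - i))
--         i = j
--     if d_mode == 0:
--         return sum(c * (c - 1) for _, c in runs)
--     g = d_mode if d_mode > 0 else -d_mode
--     total = 0
--     i = j = 0
--     m = len(runs)
--     while i < m and j < m:
--         t = runs[i][0] + g
--         w = runs[j][0]
--         if t < w:
--             i += 1
--         elif w < t: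
--             j += 1
--         else:
--             total += runs[i][1] * runs[j][1]
--             i += 1
--             j += 1
--     return total
-- ===== Notes on version B (the rewrite author's own statement) =====
-- stated objective: alternative
-- what changed: Replaces the hash-map counter and per-key dict lookups by sort + run-length collapse + a single two-pointer merge walk over the runs pairing each value v with v+|d_mode|.
import Mathlib
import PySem

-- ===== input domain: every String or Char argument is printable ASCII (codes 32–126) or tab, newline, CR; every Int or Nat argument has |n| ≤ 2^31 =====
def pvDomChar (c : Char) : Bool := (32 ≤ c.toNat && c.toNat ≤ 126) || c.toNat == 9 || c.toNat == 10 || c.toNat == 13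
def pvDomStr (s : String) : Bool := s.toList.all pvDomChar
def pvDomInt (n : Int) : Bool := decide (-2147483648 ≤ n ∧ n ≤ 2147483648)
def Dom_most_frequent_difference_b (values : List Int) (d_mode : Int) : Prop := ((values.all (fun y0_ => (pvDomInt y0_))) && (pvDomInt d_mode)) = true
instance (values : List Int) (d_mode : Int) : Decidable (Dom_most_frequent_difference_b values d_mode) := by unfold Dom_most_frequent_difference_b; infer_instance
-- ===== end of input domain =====

-- B replaces the hash-map counter and per-key dict lookups by sort + run-length
-- collapse + a single two-pointer merge walk over the runs (objective: alternative algorithm).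

-- ===== PORT A =====
def most_frequent_difference_b (values : List Int) (d_mode : Int) : Int :=
  -- freq = {}; for num in values: if num in freq: freq[num] += 1 else: freq[num] = 1
  let freq : PySem.Dict Int Int := values.foldl
    (fun d num => if d.contains num then d.insert num (d.getD num 0 + 1) else d.insert num 1)
    PySem.Dict.empty
  -- count = 0; for num in freq: …   (freq[num] read as getD … 0: exact, the key is present)
  freq.keys.foldl
    (fun count num =>
      if d_mode = 0 then count + freq.getD num 0 * (freq.getD num 0 - 1)
      else if freq.contains (num - d_mode) then
        count + freq.getD num 0 * freq.getD (num - d_mode) 0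
      else count)
    0

-- ===== PORT B =====
-- run-length collapse of the sorted list (Source B's nested while loops: the inner
-- 'while j < n and s[j] == s[i]' is the takeWhile/dropWhile split of the tail)
def pvRuns : List Int → List (Int × Int)
  | [] => []
  | x :: xs =>
    (x, 1 + ((xs.takeWhile (fun y => y == x)).length : Int)) ::
      pvRuns (xs.dropWhile (fun y => y == x))
  termination_by s => s.length
  decreasing_by
    simp only [List.length_cons]
    exact Nat.lt_succ_of_le (List.length_dropWhile_le _ _)

-- Source B's two-pointer while loop over indices i, j: the two lists are the
-- suffixes of the run list from i and from j; each step advances i, j or both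
def pvJoin (g : Int) : List (Int × Int) → List (Int × Int) → Int
  | [], _ => 0
  | _ :: _, [] => 0
  | (a, ca) :: rs, (b, cb) :: ts =>
    if a + g < b then pvJoin g rs ((b, cb) :: ts)
    else if b < a + g then pvJoin g ((a, ca) :: rs) ts
    else ca * cb + pvJoin g rs ts
  termination_by rs ts => rs.length + ts.length

def most_frequent_difference_b_alt (values : List Int) (d_mode : Int) : Int :=
  let s := PySem.List.sorted values (fun x => x) false
  let runs := pvRuns s
  if d_mode = 0 then (runs.map (fun p => p.2 * (p.2 - 1))).sum
  else
    let g := if d_mode > 0 then d_mode else -d_mode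
    pvJoin g runs runs

-- ===== PRECONDITION & SPEC =====
def Spec_most_frequent_difference_b (values : List Int) (d_mode : Int) (out : Int) : Prop := out = most_frequent_difference_b_alt values d_mode
instance (values : List Int) (d_mode : Int) (out : Int) : Decidable (Spec_most_frequent_difference_b values d_mode out) := by unfold Spec_most_frequent_difference_b; infer_instance

-- ===== CLAIM (what is proved, stated in full; the proofs are below) =====
def Claim_equal_most_frequent_difference_b : Prop := ∀ (values : List Int) (d_mode : Int), Dom_most_frequent_difference_b values d_mode → Spec_most_frequent_difference_b values d_mode (most_frequent_difference_b values d_mode)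

-- ===== LEMMAS AND PROOFS =====

-- the multiplicity of v in values, as an Int
def pvCnt (values : List Int) (v : Int) : Int := (values.count v : Int)

-- A's first loop builds Counter(values)
lemma pvA_fold_eq_counter (values : List Int) :
    values.foldl
      (fun d num => if d.contains num then d.insert num (d.getD num 0 + 1) else d.insert num 1)
      PySem.Dict.empty = PySem.Dict.counter values := by
  have h : ∀ (d : PySem.Dict Int Int) (num : Int),
      (if d.contains num then d.insert num (d.getD num 0 + 1) else d.insert num 1)
        = d.insert num (d.getD num 0 + 1) := by
    intro d num
    by_cases hc : d.contains num
    · simp [hc]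
    · simp only [Bool.not_eq_true] at hc
      simp [hc, PySem.Dict.getD_of_not_contains d 0 hc]
  simp only [h]
  exact PySem.Dict.foldl_insert_getD_add_one_eq_counter values

-- A's result as a sum over the distinct values
lemma pvA_eq_sum (values : List Int) (d_mode : Int) :
    most_frequent_difference_b values d_mode =
      ((PySem.Set.ofList values).map
        (fun v => if d_mode = 0 then pvCnt values v * (pvCnt values v - 1)
                  else pvCnt values v * pvCnt values (v - d_mode))).sum := by
  unfold most_frequent_difference_b
  simp only [pvA_fold_eq_counter, PySem.Dict.keys_counter]
  by_cases hd : d_mode = 0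
  · simp only [hd, if_true]
    have := PySem.List.foldl_add (PySem.Set.ofList values)
      (fun v => (PySem.Dict.counter values).getD v 0 * ((PySem.Dict.counter values).getD v 0 - 1)) 0
    rw [this]
    simp [PySem.Dict.getD_counter, pvCnt]
  · simp only [hd, if_false]
    have hstep : ∀ (acc : Int) (num : Int),
        (if (PySem.Dict.counter values).contains (num - d_mode) then
          acc + (PySem.Dict.counter values).getD num 0 * (PySem.Dict.counter values).getD (num - d_mode) 0
        else acc)
        = acc + pvCnt values num * pvCnt values (num - d_mode) := by
      intro acc num
      by_cases hc : (PySem.Dict.counter values).contains (num - d_mode)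
      · simp [hc, PySem.Dict.getD_counter, pvCnt]
      · simp only [Bool.not_eq_true] at hc
        have h2 : values.count (num - d_mode) = 0 := by
          have := PySem.Dict.contains_counter values (num - d_mode)
          rw [hc] at this
          simpa [List.count_eq_zero] using this.symm
        simp [hc, pvCnt, h2]
    simp only [hstep]
    rw [PySem.List.foldl_add (PySem.Set.ofList values)
      (fun num => pvCnt values num * pvCnt values (num - d_mode)) 0]
    simp

-- in a sorted list, dropping the leading block of x removes every copy of x
lemma pv_not_mem_dropWhile (x : Int) (xs : List Int)
    (hs : (x :: xs).Pairwise (· ≤ ·)) : x ∉ xs.dropWhile (fun y => y == x) := by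
  induction xs with
  | nil => simp
  | cons y ys ih =>
    rcases List.pairwise_cons.mp hs with ⟨hx, hys⟩
    by_cases hxy : y = x
    · subst hxy
      have hs' : (y :: ys).Pairwise (· ≤ ·) := by
        refine List.pairwise_cons.mpr ⟨?_, (List.pairwise_cons.mp hys).2⟩
        intro z hz; exact hx z (List.mem_cons_of_mem _ hz)
      simpa [List.dropWhile_cons] using ih hs'
    · simp only [List.dropWhile_cons, beq_iff_eq, hxy, if_false]
      intro hmem
      rcases List.mem_cons.mp hmem with h | h
      · exact hxy h.symm
      · have h1 : x ≤ y := hx y (List.mem_cons_self)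
        have h2 : y ≤ x := (List.pairwise_cons.mp hys).1 x h
        exact hxy (le_antisymm h2 h1)

-- run-length facts over a sorted list: the keys are its distinct elements in
-- strictly increasing order and each second component is the multiplicity
lemma pvRuns_spec (s : List Int) (hs : s.Pairwise (· ≤ ·)) :
    (∀ v, v ∈ (pvRuns s).map Prod.fst ↔ v ∈ s)
  ∧ ((pvRuns s).map Prod.fst).Pairwise (· < ·)
  ∧ (∀ p ∈ pvRuns s, p.2 = (s.count p.1 : Int)) := by
  induction s using pvRuns.induct with
  | case1 => simp [pvRuns]
  | case2 x xs ih =>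
    have hdsub : (xs.dropWhile (fun y => y == x)).Sublist (x :: xs) :=
      (List.dropWhile_sublist _).trans (List.sublist_cons_self _ _)
    have hd : (xs.dropWhile (fun y => y == x)).Pairwise (· ≤ ·) := hs.sublist hdsub
    obtain ⟨ihmem, ihlt, ihcnt⟩ := ih hd
    have hnx : x ∉ xs.dropWhile (fun y => y == x) := pv_not_mem_dropWhile x xs hs
    have hgt : ∀ v ∈ xs.dropWhile (fun y => y == x), x < v := by
      intro v hv
      have hvx : v ∈ xs := (List.dropWhile_sublist _).mem hv
      have hle : x ≤ v := (List.pairwise_cons.mp hs).1 v hvx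
      rcases lt_or_eq_of_le hle with h | h
      · exact h
      · exact absurd (h ▸ hv) hnx
    have hsplit : xs = xs.takeWhile (fun y => y == x) ++ xs.dropWhile (fun y => y == x) :=
      (List.takeWhile_append_dropWhile).symm
    have htake_all : ∀ y ∈ xs.takeWhile (fun y => y == x), y = x := by
      intro y hy
      simpa using List.mem_takeWhile_imp hy
    have hcount_take : ∀ v, (xs.takeWhile (fun y => y == x)).count v =
        if v = x then (xs.takeWhile (fun y => y == x)).length else 0 := by
      intro v
      split_ifs with h
      · subst h
        exact List.count_eq_length.mpr (fun y hy => (htake_all y hy).symm)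
      · exact List.count_eq_zero.mpr (fun hv => h (htake_all v hv))
    have hcdrop : (xs.dropWhile (fun y => y == x)).count x = 0 := List.count_eq_zero.mpr hnx
    have hcxs : ∀ v, xs.count v =
        (xs.takeWhile (fun y => y == x)).count v + (xs.dropWhile (fun y => y == x)).count v := by
      intro v; conv_lhs => rw [hsplit]
      exact List.count_append ..
    refine ⟨?_, ?_, ?_⟩
    · intro v
      simp only [pvRuns, List.map_cons, List.mem_cons, ihmem v]
      constructor
      · rintro (h | h)
        · exact Or.inl h
        · exact Or.inr ((List.dropWhile_sublist _).mem h)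
      · rintro (h | h)
        · exact Or.inl h
        · by_cases hvx : v = x
          · exact Or.inl hvx
          · right
            rw [hsplit] at h
            rcases List.mem_append.mp h with h' | h'
            · exact absurd (htake_all v h') hvx
            · exact h'
    · simp only [pvRuns, List.map_cons]
      refine List.pairwise_cons.mpr ⟨?_, ihlt⟩
      intro k hk
      exact hgt k ((ihmem k).mp hk)
    · simp only [pvRuns, List.mem_cons]
      rintro p (rfl | hp)
      · simp only [List.count_cons_self]
        have : xs.count x = (xs.takeWhile (fun y => y == x)).length := by
          have := hcxs x
          rw [hcdrop, hcount_take x, if_pos rfl] at this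
          omega
        rw [this]; push_cast; ring
      · have h2 := ihcnt p hp
        have hp1 : p.1 ∈ xs.dropWhile (fun y => y == x) :=
          (ihmem p.1).mp (List.mem_map_of_mem hp)
        have hpx : p.1 ≠ x := fun h => hnx (h ▸ hp1)
        have : (x :: xs).count p.1 = (xs.dropWhile (fun y => y == x)).count p.1 := by
          rw [List.count_cons, hcxs p.1, hcount_take p.1, if_neg hpx]
          simp [Ne.symm hpx]
        rw [this]; exact h2

-- the two-pointer walk computes Σ over rs of (count at key) · (count at key+g)
lemma pvJoin_spec (g : Int) (c : Int → Int) :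
    ∀ (rs ts : List (Int × Int)),
    ((rs.map Prod.fst).Pairwise (· < ·)) →
    ((ts.map Prod.fst).Pairwise (· < ·)) →
    (∀ p ∈ ts, p.2 = c p.1) →
    (∀ p ∈ rs, p.1 + g ∉ ts.map Prod.fst → c (p.1 + g) = 0) →
    pvJoin g rs ts = (rs.map (fun p => p.2 * c (p.1 + g))).sum := by
  intro rs ts
  induction rs, ts using pvJoin.induct g with
  | case1 ts =>
    intro _ _ _ _; simp [pvJoin]
  | case2 r rs' =>
    intro _ _ _ h0
    simp only [pvJoin]
    symm
    apply List.sum_eq_zero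
    intro y hy
    rcases List.mem_map.mp hy with ⟨p, hp, rfl⟩
    rw [h0 p hp (by simp), mul_zero]
  | case3 a ca rs' b cb ts' hlt ih =>
    intro hrs hts htc h0
    rw [pvJoin, if_pos hlt]
    have hc0 : c (a + g) = 0 := by
      apply h0 (a, ca) (List.mem_cons_self)
      simp only [List.map_cons, List.mem_cons]
      rintro (h | h)
      · omega
      · rcases List.mem_map.mp h with ⟨q, hq, hq1⟩
        have := (List.pairwise_cons.mp hts).1 q.1 (List.mem_map_of_mem hq)
        omega
    rw [ih (List.pairwise_cons.mp hrs).2 hts htc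
      (fun p hp h => h0 p (List.mem_cons_of_mem _ hp) h)]
    simp [hc0]
  | case4 a ca rs' b cb ts' hnlt hlt ih =>
    intro hrs hts htc h0
    rw [pvJoin, if_neg hnlt, if_pos hlt]
    apply ih hrs (List.pairwise_cons.mp hts).2
      (fun p hp => htc p (List.mem_cons_of_mem _ hp))
    intro p hp hmem
    apply h0 p hp
    simp only [List.map_cons, List.mem_cons]
    rintro (h | h)
    · rcases List.mem_cons.mp hp with rfl | hp'
      · omega
      · have := (List.pairwise_cons.mp hrs).1 p.1 (List.mem_map_of_mem hp')
        omega
    · exact hmem h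
  | case5 a ca rs' b cb ts' h1 h2 ih =>
    intro hrs hts htc h0
    have heq : a + g = b := by omega
    rw [pvJoin, if_neg h1, if_neg h2]
    have hcb : c (a + g) = cb := by
      rw [heq]; exact (htc (b, cb) (List.mem_cons_self)).symm
    rw [ih (List.pairwise_cons.mp hrs).2 (List.pairwise_cons.mp hts).2
      (fun p hp => htc p (List.mem_cons_of_mem _ hp)) ?_]
    · simp [hcb]
    · intro p hp hmem
      apply h0 p (List.mem_cons_of_mem _ hp)
      simp only [List.map_cons, List.mem_cons]
      rintro (h | h)
      · have := (List.pairwise_cons.mp hrs).1 p.1 (List.mem_map_of_mem hp)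
        omega
      · exact hmem h

-- reindexing v ↦ v + d of the pair sum over the distinct values
lemma pv_sum_shift (l : List Int) (hnd : l.Nodup) (c : Int → Int) (d : Int)
    (h0 : ∀ v, v ∉ l → c v = 0) :
    (l.map (fun v => c v * c (v - d))).sum = (l.map (fun v => c v * c (v + d))).sum := by
  rw [← List.sum_toFinset _ hnd, ← List.sum_toFinset _ hnd]
  set S := l.toFinset with hS
  have h0' : ∀ v, v ∉ S → c v = 0 := by
    intro v hv; exact h0 v (by simpa [hS] using hv)
  have hsub1 : S ⊆ S ∪ S.image (· + d) := Finset.subset_union_left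
  have hT : S ∪ S.image (· + d) = (S.image (· - d) ∪ S).image (· + d) := by
    rw [Finset.image_union]
    rw [Finset.image_image]
    have h1 : S.image ((· + d) ∘ (· - d)) = S := by
      have : ((· + d) ∘ (· - d)) = (id : Int → Int) := by funext v; simp
      rw [this, Finset.image_id]
    rw [h1]
  calc ∑ v ∈ S, c v * c (v - d)
      = ∑ v ∈ S ∪ S.image (· + d), c v * c (v - d) := by
        apply Finset.sum_subset hsub1
        intro v _ hv
        rw [h0' v hv, zero_mul]
    _ = ∑ w ∈ S.image (· - d) ∪ S, c (w + d) * c (w + d - d) := by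
        rw [hT, Finset.sum_image]
        intro u _ v _ h
        simpa using h
    _ = ∑ w ∈ S.image (· - d) ∪ S, c w * c (w + d) := by
        apply Finset.sum_congr rfl
        intro w _
        rw [add_sub_cancel_right, mul_comm]
    _ = ∑ w ∈ S, c w * c (w + d) := by
        symm
        apply Finset.sum_subset Finset.subset_union_right
        intro w _ hw
        rw [h0' w hw, zero_mul]

-- ===== VERDICT (by name: the statement is the Claim_ definition above) =====
theorem most_frequent_difference_b_spec : Claim_equal_most_frequent_difference_b := by
  intro values d_mode _
  unfold Spec_most_frequent_difference_b
  rw [pvA_eq_sum]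
  unfold most_frequent_difference_b_alt
  have hperm : (PySem.List.sorted values (fun x => x) false).Perm values :=
    PySem.List.sorted_perm values (fun x => x) false
  have hs : (PySem.List.sorted values (fun x => x) false).Pairwise (· ≤ ·) :=
    PySem.List.sorted_pairwise values (fun x => x)
  obtain ⟨hmem, hlt, hcnt⟩ := pvRuns_spec _ hs
  have hc_runs : ∀ p ∈ pvRuns (PySem.List.sorted values (fun x => x) false),
      p.2 = pvCnt values p.1 := by
    intro p hp
    rw [hcnt p hp, pvCnt, hperm.count_eq]
  have hKnodup : ((pvRuns (PySem.List.sorted values (fun x => x) false)).map Prod.fst).Nodup :=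
    hlt.imp ne_of_lt
  have hKmem : ∀ v, v ∈ (pvRuns (PySem.List.sorted values (fun x => x) false)).map Prod.fst
      ↔ v ∈ values := fun v => (hmem v).trans hperm.mem_iff
  have hzero : ∀ v, v ∉ (pvRuns (PySem.List.sorted values (fun x => x) false)).map Prod.fst →
      pvCnt values v = 0 := by
    intro v hv
    rw [pvCnt, Int.natCast_eq_zero, List.count_eq_zero]
    exact fun h => hv ((hKmem v).mpr h)
  have hpermKD : ((pvRuns (PySem.List.sorted values (fun x => x) false)).map Prod.fst).Perm
      (PySem.Set.ofList values) :=
    (List.perm_ext_iff_of_nodup hKnodup (PySem.Set.nodup_ofList values)).mpr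
      (fun v => (hKmem v).trans (PySem.Set.mem_ofList values v).symm)
  by_cases hd : d_mode = 0
  · simp only [hd, if_true]
    have hBmap : (pvRuns (PySem.List.sorted values (fun x => x) false)).map
        (fun p => p.2 * (p.2 - 1))
        = ((pvRuns (PySem.List.sorted values (fun x => x) false)).map Prod.fst).map
            (fun v => pvCnt values v * (pvCnt values v - 1)) := by
      rw [List.map_map]
      exact List.map_congr_left (fun p hp => by rw [hc_runs p hp]; rfl)
    rw [hBmap]
    exact ((hpermKD.map (fun v => pvCnt values v * (pvCnt values v - 1))).sum_eq).symm
  · simp only [hd, if_false]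
    set g := if d_mode > 0 then d_mode else -d_mode with hg
    rw [pvJoin_spec g (pvCnt values) _ _ hlt hlt hc_runs
      (fun p _ h => hzero _ h)]
    have hBmap : (pvRuns (PySem.List.sorted values (fun x => x) false)).map
        (fun p => p.2 * pvCnt values (p.1 + g))
        = ((pvRuns (PySem.List.sorted values (fun x => x) false)).map Prod.fst).map
            (fun v => pvCnt values v * pvCnt values (v + g)) := by
      rw [List.map_map]
      exact List.map_congr_left (fun p hp => by rw [hc_runs p hp]; rfl)
    rw [hBmap]
    have hA : ((PySem.Set.ofList values).map
          (fun v => pvCnt values v * pvCnt values (v - d_mode))).sum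
        = (((pvRuns (PySem.List.sorted values (fun x => x) false)).map Prod.fst).map
            (fun v => pvCnt values v * pvCnt values (v - d_mode))).sum :=
      ((hpermKD.map (fun v => pvCnt values v * pvCnt values (v - d_mode))).sum_eq).symm
    rw [hA]
    by_cases hpos : d_mode > 0
    · rw [hg, if_pos hpos]
      exact pv_sum_shift _ hKnodup (pvCnt values) d_mode hzero
    · rw [hg, if_neg hpos]
      apply congrArg
      apply List.map_congr_left
      intro v _
      have : v + -d_mode = v - d_mode := by ring
      rw [this]
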